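-- pv_equiv track=rewrite | github.com/Oost-hash/TinyUi | src/tinyui/config/config_tool/flat_to_nested/scan/columns.py | find_show_key
-- ===== SOURCE A (Python) =====
-- from typing import Any, Dict, List, Optional, Set
--
-- def find_show_key(suffix: str, keys: List[str]) -> Optional[str]:
--     """Vind show_key die bij een suffix hoort."""
--     show_keys = [k for k in keys if k.startswith("show_")]
--
--     # Exacte match: show_<suffix>
--     exact = f"show_{suffix}"
--     if exact in show_keys:
--         return exact
--
--     # Partial match: suffix komt voor in show_key na "show_"
--     for sk in show_keys:
--         show_part = sk[5:]  # na "show_"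
--         if suffix in show_part or show_part in suffix:
--             return sk
--
--     # Fallback: longest common substring
--     best_match = None
--     best_score = 0
--     for sk in show_keys:
--         show_part = sk[5:]
--         score = len(set(suffix.split("_")) & set(show_part.split("_")))
--         if score > best_score:
--             best_score = score
--             best_match = sk
--
--     return best_match
-- ===== SOURCE B (Python) =====
-- def find_show_key(suffix, keys):
--     """Single combined pass: tracks exact hit, first partial match, and best
--     token-overlap score over the show_ keys, then applies the priority order."""
--     exact = "show_" + suffix
--     suffix_tokens = set(suffix.split("_"))
--     seen_exact = False
--     first_partial = None
--     best_match = None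
--     best_score = 0
--     for k in keys:
--         if not k.startswith("show_"):
--             continue
--         if k == exact:
--             seen_exact = True
--         part = k[5:]
--         if first_partial is None and (suffix in part or part in suffix):
--             first_partial = k
--         score = len(suffix_tokens & set(part.split("_")))
--         if score > best_score:
--             best_score = score
--             best_match = k
--     if seen_exact:
--         return exact
--     if first_partial is not None:
--         return first_partial
--     return best_match
-- ===== Notes on version B (the rewrite author's own statement) =====
-- stated objective: alternative
-- what changed: B replaces A's three sequential scans over the show_ keys (exact membership test, first-partial-match loop, best-score loop) by one combined pass that maintains the exact hit, the first partial match and the best token-overlap score simultaneously, applying the priority order after the loop.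
import Mathlib
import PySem

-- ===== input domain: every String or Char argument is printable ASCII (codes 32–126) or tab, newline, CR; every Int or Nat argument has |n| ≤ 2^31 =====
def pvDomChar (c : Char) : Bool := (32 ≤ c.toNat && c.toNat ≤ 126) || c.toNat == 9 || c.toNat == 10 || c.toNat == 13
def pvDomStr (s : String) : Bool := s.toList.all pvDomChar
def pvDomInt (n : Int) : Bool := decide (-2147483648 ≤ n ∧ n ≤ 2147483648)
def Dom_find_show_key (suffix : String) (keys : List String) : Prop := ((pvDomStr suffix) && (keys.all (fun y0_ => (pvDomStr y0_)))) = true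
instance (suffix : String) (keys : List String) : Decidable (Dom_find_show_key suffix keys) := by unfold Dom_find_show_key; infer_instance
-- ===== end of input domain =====

-- B replaces A's three sequential scans over the show_ keys by one combined pass
-- maintaining the exact hit, the first partial match and the best-score key (objective: alternative).


-- ===== PORT A =====
-- score = len(set(suffix.split("_")) & set(sk[5:].split("_")))
def fsk_score (suffix sk : String) : Int :=
  PySem.Set.len (PySem.Set.inter
    (PySem.Set.ofList ((PySem.Str.split? suffix "_").getD []))
    (PySem.Set.ofList ((PySem.Str.split? (PySem.Str.slice sk (some 5) none) "_").getD [])))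

-- A's second loop (return on first partial match)
def fsk_partial (suffix : String) : List String → Option String
  | [] => none
  | sk :: rest =>
    let show_part := PySem.Str.slice sk (some 5) none
    if PySem.Str.isIn suffix show_part || PySem.Str.isIn show_part suffix then some sk
    else fsk_partial suffix rest

-- A's third loop body: state (best_match, best_score)
def fsk_scoreStep (suffix : String) (st : Option String × Int) (sk : String) : Option String × Int :=
  let score := fsk_score suffix sk
  if st.2 < score then (some sk, score) else st

def find_show_key (suffix : String) (keys : List String) : Option String :=
  let show_keys := keys.filter (fun k => PySem.Str.startswith k "show_")
  let exact := "show_" ++ suffix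
  if show_keys.contains exact then some exact
  else
    match fsk_partial suffix show_keys with
    | some sk => some sk
    | none => (show_keys.foldl (fsk_scoreStep suffix) (none, 0)).1

-- ===== PORT B =====
-- loop body of B's single pass: state (seen_exact, first_partial, best_match, best_score)
def altStep (suffix exact : String) (stok : PySem.Set String)
    (st : Bool × Option String × Option String × Int) (k : String) :
    Bool × Option String × Option String × Int :=
  if PySem.Str.startswith k "show_" then
    let se := st.1 || (k == exact)
    let part := PySem.Str.slice k (some 5) none
    let fp := if st.2.1.isNone && (PySem.Str.isIn suffix part || PySem.Str.isIn part suffix)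
              then some k else st.2.1
    let score := PySem.Set.len (PySem.Set.inter stok
      (PySem.Set.ofList ((PySem.Str.split? part "_").getD [])))
    if st.2.2.2 < score then (se, fp, some k, score) else (se, fp, st.2.2.1, st.2.2.2)
  else st

def find_show_key_alt (suffix : String) (keys : List String) : Option String :=
  let exact := "show_" ++ suffix
  let stok := PySem.Set.ofList ((PySem.Str.split? suffix "_").getD [])
  let st := keys.foldl (altStep suffix exact stok) (false, none, none, 0)
  if st.1 then some exact
  else if st.2.1.isSome then st.2.1
  else st.2.2.1

-- ===== PRECONDITION & SPEC =====
def Spec_find_show_key (suffix : String) (keys : List String) (out : Option String) : Prop := out = find_show_key_alt suffix keys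
instance (suffix : String) (keys : List String) (out : Option String) : Decidable (Spec_find_show_key suffix keys out) := by unfold Spec_find_show_key; infer_instance

-- ===== CLAIM (what is proved, stated in full; the proofs are below) =====
def Claim_equal_find_show_key : Prop := ∀ (suffix : String) (keys : List String), Dom_find_show_key suffix keys → Spec_find_show_key suffix keys (find_show_key suffix keys)

-- ===== LEMMAS AND PROOFS =====

-- B's single pass over keys computes A's three scan results at once.
theorem altStep_fold (suffix : String) (l : List String) :
    ∀ (se : Bool) (fp : Option String) (bmbs : Option String × Int),
    l.foldl (altStep suffix ("show_" ++ suffix)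
        (PySem.Set.ofList ((PySem.Str.split? suffix "_").getD []))) (se, fp, bmbs)
    = (se || (l.filter (fun k => PySem.Str.startswith k "show_")).contains ("show_" ++ suffix),
       fp.or (fsk_partial suffix (l.filter (fun k => PySem.Str.startswith k "show_"))),
       (l.filter (fun k => PySem.Str.startswith k "show_")).foldl (fsk_scoreStep suffix) bmbs) := by
  induction l with
  | nil => intro se fp bmbs; simp [fsk_partial]
  | cons k rest ih =>
    intro se fp bmbs
    rw [List.foldl_cons]
    by_cases hk : PySem.Str.startswith k "show_" = true
    · have hstep : altStep suffix ("show_" ++ suffix)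
          (PySem.Set.ofList ((PySem.Str.split? suffix "_").getD [])) (se, fp, bmbs) k
        = (se || (k == ("show_" ++ suffix)),
           (if fp.isNone && (PySem.Str.isIn suffix (PySem.Str.slice k (some 5) none)
              || PySem.Str.isIn (PySem.Str.slice k (some 5) none) suffix) then some k else fp),
           fsk_scoreStep suffix bmbs k) := by
        simp only [altStep, hk, if_true, fsk_scoreStep, fsk_score]
        split <;> rfl
      have hf : List.filter (fun k => PySem.Str.startswith k "show_") (k :: rest)
          = k :: List.filter (fun k => PySem.Str.startswith k "show_") rest := by
        simp only [List.filter_cons, hk, if_true]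
      rw [hstep, ih, hf, List.contains_cons, List.foldl_cons]
      simp only [Prod.mk.injEq]
      refine ⟨?_, ?_, trivial⟩
      · rw [Bool.or_assoc, BEq.comm]
      · cases fp with
        | some x => simp
        | none =>
          simp only [Option.isNone_none, Bool.true_and, fsk_partial, Option.none_or]
          split <;> simp
    · have hk' : PySem.Str.startswith k "show_" = false := by simpa using hk
      have hstep : altStep suffix ("show_" ++ suffix)
          (PySem.Set.ofList ((PySem.Str.split? suffix "_").getD [])) (se, fp, bmbs) k
          = (se, fp, bmbs) := by simp only [altStep, hk']; rfl
      have hf : List.filter (fun k => PySem.Str.startswith k "show_") (k :: rest)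
          = List.filter (fun k => PySem.Str.startswith k "show_") rest := by
        simp only [List.filter_cons, hk', Bool.false_eq_true, if_false]
      rw [hstep, hf]
      exact ih se fp bmbs

-- ===== VERDICT (by name: the statement is the Claim_ definition above) =====
theorem find_show_key_spec : Claim_equal_find_show_key := by
  intro suffix keys _
  unfold Spec_find_show_key find_show_key find_show_key_alt
  dsimp only []
  rw [altStep_fold]
  simp only [Bool.false_or, Option.or]
  split
  · rfl
  · cases fsk_partial suffix (keys.filter (fun k => PySem.Str.startswith k "show_")) <;> simp
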